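-- pv_equiv track=rewrite | github.com/pavanreddy565/GeeksForGeeks_Solutions | Difficulty: Medium/Minimum Platforms/minimum-platforms.py | countPlatforms
-- ===== SOURCE A (Python) =====
-- def countPlatforms(arr, dep):
--     arr.sort()
--     dep.sort()
--
--
--     ans = 1
--     count = 1
--     i = 1
--     j = 0
--     while i < len(arr) and j < len(dep):
--         if arr[i] <= dep[j]:  # one more platform needed
--             count += 1
--             i += 1
--         else:  # one platform can be reduced
--             count -= 1
--             j += 1
--         ans = max(ans, count)  # updating the value with the current maximum
--     return ans
-- ===== SOURCE B (Python) =====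
-- def countPlatforms(arr, dep):
--     arr.sort()
--     dep.sort()
--     ans = 1  # at least one platform
--     for j, d in enumerate(dep):
--         # trains present when this departure frees a platform: arrivals not
--         # after time d, minus the j departures already gone
--         lo, hi = 0, len(arr)
--         while lo < hi:
--             mid = (lo + hi) // 2
--             if arr[mid] <= d:
--                 lo = mid + 1
--             else:
--                 hi = mid
--         ans = max(ans, lo - j)
--     return ans
-- ===== Notes on version B (the rewrite author's own statement) =====
-- stated objective: alternative
-- what changed: Replaced A's two-pointer merge walk over the sorted arrival/departure arrays (with a running platform counter) by a per-departure computation: for each departure, a hand-written binary search counts the arrivals not after it, and the answer is the maximum over departures of that count minus the departures already gone, floored at one platform.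
import Mathlib
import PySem

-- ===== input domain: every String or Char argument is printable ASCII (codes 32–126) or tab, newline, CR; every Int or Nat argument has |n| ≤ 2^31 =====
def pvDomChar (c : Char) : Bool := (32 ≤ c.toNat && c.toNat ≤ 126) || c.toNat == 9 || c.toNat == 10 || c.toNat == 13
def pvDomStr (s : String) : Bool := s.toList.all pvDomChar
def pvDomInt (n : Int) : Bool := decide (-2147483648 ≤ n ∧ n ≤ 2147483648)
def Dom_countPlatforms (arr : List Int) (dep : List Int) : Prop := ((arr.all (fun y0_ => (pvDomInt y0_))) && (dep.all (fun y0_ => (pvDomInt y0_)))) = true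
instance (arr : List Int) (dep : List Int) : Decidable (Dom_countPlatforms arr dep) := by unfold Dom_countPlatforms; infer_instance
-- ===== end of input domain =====

-- B computes, per departure in sorted order, the arrivals not after it by a binary search,
-- instead of A's two-pointer merge walk (objective: alternative).  Both sort arr and dep in
-- place; the mutation is identical, the equivalence proved is about the return value.

-- ===== PORT A =====
-- the while loop; i, j are the two cursors (always ≥ 0 in Python, so Nat is exact here)
def countPlatformsLoop (arr : List Int) (dep : List Int) (i j : Nat) (count ans : Int) : Int :=
  if i < arr.length ∧ j < dep.length then
    if arr.getD i 0 ≤ dep.getD j 0 then      -- in range by the loop guard, so getD is exact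
      countPlatformsLoop arr dep (i + 1) j (count + 1) (max ans (count + 1))
    else
      countPlatformsLoop arr dep i (j + 1) (count - 1) (max ans (count - 1))
  else ans
termination_by (arr.length - i) + (dep.length - j)
decreasing_by all_goals omega

def countPlatforms (arr : List Int) (dep : List Int) : Int :=
  let arr := PySem.List.sorted arr (fun x => x)
  let dep := PySem.List.sorted dep (fun x => x)
  countPlatformsLoop arr dep 1 0 1 1

-- ===== PORT B =====
-- Source B's hand-written bisect loop; lo, hi stay in [0, n] so Nat and `/` match Python
def bsLoop (arr : List Int) (d : Int) (lo hi : Nat) : Nat :=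
  if lo < hi then
    let mid := (lo + hi) / 2
    if arr.getD mid 0 ≤ d then bsLoop arr d (mid + 1) hi   -- mid < hi ≤ len: in range, getD exact
    else bsLoop arr d lo mid
  else lo
termination_by hi - lo
decreasing_by all_goals omega

def countPlatforms_alt (arr : List Int) (dep : List Int) : Int :=
  let arr := PySem.List.sorted arr (fun x => x)
  let dep := PySem.List.sorted dep (fun x => x)
  (PySem.List.enumerate dep).foldl
    (fun ans jd =>
      let lo := bsLoop arr jd.2 0 arr.length
      max ans ((lo : Int) - jd.1)) 1

-- ===== PRECONDITION & SPEC =====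
def Spec_countPlatforms (arr : List Int) (dep : List Int) (out : Int) : Prop := out = countPlatforms_alt arr dep
instance (arr : List Int) (dep : List Int) (out : Int) : Decidable (Spec_countPlatforms arr dep out) := by unfold Spec_countPlatforms; infer_instance

-- ===== CLAIM (what is proved, stated in full; the proofs are below) =====
def Claim_equal_countPlatforms : Prop := ∀ (arr : List Int) (dep : List Int), Dom_countPlatforms arr dep → Spec_countPlatforms arr dep (countPlatforms arr dep)

-- ===== LEMMAS AND PROOFS =====

-- number of elements ≤ d
def cLe (xs : List Int) (d : Int) : Nat := xs.countP (fun a => a ≤ d)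

lemma cLe_le_length (xs : List Int) (d : Int) : cLe xs d ≤ xs.length :=
  List.countP_le_length

lemma cLe_mono (xs : List Int) {d d' : Int} (h : d ≤ d') : cLe xs d ≤ cLe xs d' := by
  refine List.countP_mono_left ?_
  intro a _ ha
  simp_all
  omega

lemma cLe_ge (xs : List Int) (hs : List.Pairwise (· ≤ ·) xs) {i : Nat} (hi : i < xs.length)
    {d : Int} (h : xs[i] ≤ d) : i + 1 ≤ cLe xs d := by
  have hall : ∀ a ∈ xs.take (i + 1), (fun a => decide (a ≤ d)) a = true := by
    intro a ha
    rw [List.mem_take_iff_getElem] at ha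
    obtain ⟨k, hk, rfl⟩ := ha
    have hk' : k < xs.length := by simp at hk; omega
    have hle : xs[k] ≤ xs[i] := by
      rcases Nat.lt_or_ge k i with hki | hki
      · exact List.pairwise_iff_getElem.mp hs k i hk' hi hki
      · have hkeq : k = i := by simp at hk; omega
        subst hkeq; exact le_refl _
    simp only [decide_eq_true_eq]
    omega
  have h1 : cLe xs d = (xs.take (i + 1)).countP (fun a => a ≤ d) + (xs.drop (i + 1)).countP (fun a => a ≤ d) := by
    rw [cLe, ← List.countP_append, List.take_append_drop]
  have h2 : (xs.take (i + 1)).countP (fun a => a ≤ d) = (xs.take (i + 1)).length :=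
    List.countP_eq_length.mpr hall
  have h3 : (xs.take (i + 1)).length = i + 1 := by simp; omega
  omega

lemma cLe_le (xs : List Int) (hs : List.Pairwise (· ≤ ·) xs) {i : Nat} (hi : i < xs.length)
    {d : Int} (h : d < xs[i]) : cLe xs d ≤ i := by
  have hz : (xs.drop i).countP (fun a => a ≤ d) = 0 := by
    refine List.countP_eq_zero.mpr ?_
    intro a ha
    rw [List.mem_iff_getElem] at ha
    obtain ⟨k, hk, rfl⟩ := ha
    have hk' : i + k < xs.length := by simp at hk; omega
    have hle : xs[i] ≤ xs[i + k] := by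
      rcases Nat.eq_zero_or_pos k with hk0 | hk0
      · subst hk0; simp
      · exact List.pairwise_iff_getElem.mp hs i (i + k) hi hk' (by omega)
    simp only [List.getElem_drop, decide_eq_true_eq]
    omega
  have h1 : cLe xs d = (xs.take i).countP (fun a => a ≤ d) + (xs.drop i).countP (fun a => a ≤ d) := by
    rw [cLe, ← List.countP_append, List.take_append_drop]
  have h2 : (xs.take i).countP (fun a => a ≤ d) ≤ (xs.take i).length :=
    List.countP_le_length
  have h3 : (xs.take i).length ≤ i := by simp
  omega

-- the hand-written bisect loop finds cLe on a sorted list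
lemma bsLoop_eq (arr : List Int) (hs : List.Pairwise (· ≤ ·) arr) (d : Int) :
    ∀ fuel lo hi, hi - lo ≤ fuel → lo ≤ cLe arr d → cLe arr d ≤ hi → hi ≤ arr.length →
      bsLoop arr d lo hi = cLe arr d := by
  intro fuel
  induction fuel with
  | zero =>
    intro lo hi hf h1 h2 h3
    rw [bsLoop]
    simp only [if_neg (by omega : ¬ lo < hi)]
    omega
  | succ fuel ih =>
    intro lo hi hf h1 h2 h3
    rw [bsLoop]
    by_cases hlh : lo < hi
    · simp only [if_pos hlh]
      have hmid : (lo + hi) / 2 < arr.length := by omega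
      have hget : arr.getD ((lo + hi) / 2) 0 = arr[(lo + hi) / 2] := List.getD_eq_getElem arr 0 hmid
      by_cases hcmp : arr.getD ((lo + hi) / 2) 0 ≤ d
      · simp only [if_pos hcmp]
        have hle : arr[(lo + hi) / 2] ≤ d := by rw [hget] at hcmp; exact hcmp
        have := cLe_ge arr hs hmid hle
        exact ih ((lo + hi) / 2 + 1) hi (by omega) (by omega) h2 h3
      · simp only [if_neg hcmp]
        have hlt : d < arr[(lo + hi) / 2] := by rw [hget] at hcmp; omega
        have := cLe_le arr hs hmid hlt
        exact ih lo ((lo + hi) / 2) (by omega) h1 (by omega) (by omega)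
    · simp only [if_neg hlh]
      omega

-- B's per-departure step, with the sorted arrival list fixed
def stepB (arr : List Int) (ans : Int) (jd : Int × Int) : Int :=
  let lo := bsLoop arr jd.2 0 arr.length
  max ans ((lo : Int) - jd.1)

lemma alt_eq_foldl_stepB (arr dep : List Int) :
    countPlatforms_alt arr dep =
      (PySem.List.enumerate (PySem.List.sorted dep (fun x => x))).foldl
        (stepB (PySem.List.sorted arr (fun x => x))) 1 := rfl

-- once ans already dominates n - s, the rest of the fold is absorbed
lemma foldl_stepB_absorb (arr : List Int) (hs : List.Pairwise (· ≤ ·) arr) :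
    ∀ (l : List Int) (s ans : Int), (arr.length : Int) - s ≤ ans →
      (PySem.List.enumerate l s).foldl (stepB arr) ans = ans := by
  intro l
  induction l with
  | nil => intro s ans _; simp [PySem.List.enumerate_nil]
  | cons x xs ih =>
    intro s ans h
    rw [PySem.List.enumerate_cons, List.foldl_cons]
    have hbs : bsLoop arr x 0 arr.length = cLe arr x :=
      bsLoop_eq arr hs x arr.length 0 arr.length (by omega)
        (by omega) (cLe_le_length arr _) (le_refl _)
    have hle := cLe_le_length arr x
    have hstep : stepB arr ans (s, x) = ans := by
      simp only [stepB, hbs]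
      have : ((cLe arr x : Int)) - s ≤ ans := by
        have : (cLe arr x : Int) ≤ (arr.length : Int) := by exact_mod_cast hle
        omega
      omega
    rw [hstep]
    exact ih (s + 1) ans (by omega)

-- the merge walk of A equals the per-departure fold of B over the remaining departures
lemma loop_eq_fold (arr dep : List Int)
    (hsa : List.Pairwise (· ≤ ·) arr) (hsd : List.Pairwise (· ≤ ·) dep) :
    ∀ fuel i j ans, (arr.length - i) + (dep.length - j) ≤ fuel →
      1 ≤ i → i ≤ arr.length → j ≤ dep.length →
      (∀ hj : j < dep.length, i ≤ max 1 (cLe arr dep[j])) →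
      (i : Int) - j ≤ ans → 1 ≤ ans →
      countPlatformsLoop arr dep i j ((i : Int) - j) ans =
        (PySem.List.enumerate (dep.drop j) (j : Int)).foldl (stepB arr) ans := by
  intro fuel
  induction fuel with
  | zero =>
    intro i j ans hf h1 h2 h3 hinv hans hans1
    have hj : j = dep.length := by omega
    rw [countPlatformsLoop]
    simp only [if_neg (by omega : ¬ (i < arr.length ∧ j < dep.length))]
    rw [hj]
    simp [PySem.List.enumerate_nil]
  | succ fuel ih =>
    intro i j ans hf h1 h2 h3 hinv hans hans1
    rw [countPlatformsLoop]
    by_cases hg : i < arr.length ∧ j < dep.length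
    · obtain ⟨hgi, hgj⟩ := hg
      simp only [if_pos (And.intro hgi hgj)]
      have hga : arr.getD i 0 = arr[i] := List.getD_eq_getElem arr 0 hgi
      have hgd : dep.getD j 0 = dep[j] := List.getD_eq_getElem dep 0 hgj
      have hdropj : dep.drop j = dep[j] :: dep.drop (j + 1) := List.drop_eq_getElem_cons hgj
      have hbs : bsLoop arr dep[j] 0 arr.length = cLe arr dep[j] :=
        bsLoop_eq arr hsa dep[j] arr.length 0 arr.length (by omega)
          (by omega) (cLe_le_length arr _) (le_refl _)
      have hle := cLe_le_length arr dep[j]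
      by_cases hcmp : arr.getD i 0 ≤ dep.getD j 0
      · -- arrival step
        simp only [if_pos hcmp]
        rw [hga, hgd] at hcmp
        have hc : i + 1 ≤ cLe arr dep[j] := cLe_ge arr hsa hgi hcmp
        have hinv' : ∀ hj : j < dep.length, i + 1 ≤ max 1 (cLe arr dep[j]) := by
          intro _; omega
        have heq : ((i : Int) - j) + 1 = ((i + 1 : Nat) : Int) - j := by push_cast; omega
        rw [heq]
        have hrec := ih (i + 1) j (max ans (((i + 1 : Nat) : Int) - j)) (by omega) (by omega)
          (by omega) h3 hinv' (by push_cast; omega) (by omega)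
        rw [hrec]
        -- absorb the new max into the head step of the fold
        rw [hdropj, PySem.List.enumerate_cons, List.foldl_cons, List.foldl_cons]
        congr 1
        simp only [stepB, hbs]
        have hcast : ((i + 1 : Nat) : Int) = (i : Int) + 1 := by push_cast; ring
        have hcc : (i : Int) + 1 ≤ (cLe arr dep[j] : Int) := by exact_mod_cast hc
        rw [hcast]
        omega
      · -- departure step
        simp only [if_neg hcmp]
        rw [hga, hgd] at hcmp
        have hc : cLe arr dep[j] ≤ i := cLe_le arr hsa hgi (by omega)
        have hinvj := hinv hgj
        have hinv' : ∀ hj : j + 1 < dep.length, i ≤ max 1 (cLe arr dep[j + 1]) := by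
          intro hj1
          have hmono : cLe arr dep[j] ≤ cLe arr dep[j + 1] :=
            cLe_mono arr (List.pairwise_iff_getElem.mp hsd j (j + 1) hgj hj1 (by omega))
          omega
        have heq : ((i : Int) - j) - 1 = (i : Int) - ((j + 1 : Nat) : Int) := by push_cast; omega
        have hansmax : max ans (((i : Int) - j) - 1) = ans := by omega
        rw [hansmax, heq]
        have hrec := ih i (j + 1) ans (by omega) h1 h2 (by omega) hinv' (by push_cast; omega) hans1
        rw [hrec]
        rw [hdropj, PySem.List.enumerate_cons, List.foldl_cons]
        have hcast : (j : Int) + 1 = ((j + 1 : Nat) : Int) := by push_cast; ring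
        rw [hcast]
        congr 1
        simp only [stepB, hbs]
        have hcc : (cLe arr dep[j] : Int) ≤ (i : Int) := by exact_mod_cast hc
        omega
    · simp only [if_neg hg]
      rcases Nat.lt_or_ge j dep.length with hjlt | hjge
      · -- arrivals exhausted: every remaining term is at most n - j ≤ ans
        have hi : i = arr.length := by omega
        rw [foldl_stepB_absorb arr hsa (dep.drop j) (j : Int) ans (by omega)]
      · have hj : j = dep.length := by omega
        rw [hj]
        simp [PySem.List.enumerate_nil]

-- ===== VERDICT (by name: the statement is the Claim_ definition above) =====
theorem countPlatforms_spec : Claim_equal_countPlatforms := by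
  intro arr dep _
  unfold Spec_countPlatforms
  rw [alt_eq_foldl_stepB]
  show countPlatforms arr dep = _
  unfold countPlatforms
  have hsa : List.Pairwise (· ≤ ·) (PySem.List.sorted arr (fun x => x)) :=
    PySem.List.sorted_pairwise arr (fun x => x)
  have hsd : List.Pairwise (· ≤ ·) (PySem.List.sorted dep (fun x => x)) :=
    PySem.List.sorted_pairwise dep (fun x => x)
  set sa := PySem.List.sorted arr (fun x => x) with hsa_def
  set sd := PySem.List.sorted dep (fun x => x) with hsd_def
  rcases Nat.eq_zero_or_pos sa.length with hn | hn
  · -- no arrivals: A's loop exits at once with 1; B's fold is absorbed by ans = 1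
    rw [countPlatformsLoop]
    simp only [if_neg (by omega : ¬ (1 < sa.length ∧ 0 < sd.length))]
    rw [foldl_stepB_absorb sa hsa sd 0 1 (by omega)]
  · have h := loop_eq_fold sa sd hsa hsd (sa.length + sd.length) 1 0 1 (by omega)
      (le_refl _) hn (by omega) (fun _ => by omega) (by omega) (by omega)
    simpa using h
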